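-- pv_equiv track=rewrite | github.com/REDxEYE/PRP_IO | prp_import.py | strip_to_list
-- ===== SOURCE A (Python) =====
-- def split(array, n=3):
--     return [array[i:i + n] for i in range(0, len(array), n)]
--
-- def strip_to_list(indices):
--     new_indices = []
--     for v in range(len(indices) - 2):
--         new_indices.append(indices[v])
--         if v & 1:
--             new_indices.append(indices[v + 1])
--             new_indices.append(indices[v + 2])
--         else:
--             new_indices.append(indices[v + 2])
--             new_indices.append(indices[v + 1])
--     new_indices = list(filter(lambda a: len(set(a)) == 3, split(new_indices)))
--     return new_indices
-- ===== SOURCE B (Python) =====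
-- def strip_to_list(indices):
--     out = []
--     flip = False
--     for a, b, c in zip(indices, indices[1:], indices[2:]):
--         if a != b and b != c and a != c:
--             out.append([a, b, c] if flip else [a, c, b])
--         flip = not flip
--     return out
-- ===== Notes on version B (the rewrite author's own statement) =====
-- stated objective: simpler
-- what changed: B emits triangles directly in one pass over the zipped 3-windows (zip(indices, indices[1:], indices[2:])) with a toggled winding flag and an inline distinctness test, instead of A's three-stage pipeline that builds a flat index list by position, splits it into 3-chunks, and filters chunks by set size. (B avoids materialising the 3n-element flat list and the per-chunk slices/sets, a constant-factor win)
import Mathlib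
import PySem

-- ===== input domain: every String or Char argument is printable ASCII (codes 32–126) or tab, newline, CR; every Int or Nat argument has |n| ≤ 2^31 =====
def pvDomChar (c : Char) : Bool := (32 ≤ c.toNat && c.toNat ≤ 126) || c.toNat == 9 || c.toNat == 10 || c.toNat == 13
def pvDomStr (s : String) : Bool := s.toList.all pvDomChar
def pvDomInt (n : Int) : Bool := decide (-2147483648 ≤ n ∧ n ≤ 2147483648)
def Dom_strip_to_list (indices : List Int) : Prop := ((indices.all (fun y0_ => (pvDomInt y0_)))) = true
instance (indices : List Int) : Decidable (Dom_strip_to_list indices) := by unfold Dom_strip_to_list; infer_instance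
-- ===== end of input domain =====

-- B is simpler: one pass over the zipped triangle windows, fixing winding with a toggled flag, instead of A's flat-index build + split-into-3 + filter; return value only, no mutation.

-- ===== PORT A =====
def split_port (array : List Int) (n : Int) : List (List Int) :=
  (PySem.List.pyRange 0 (array.length : Int) n).map
    (fun i => PySem.List.slice array (some i) (some (i + n)))

def strip_to_list (indices : List Int) : List (List Int) :=
  let new_indices := (PySem.List.pyRange 0 ((indices.length : Int) - 2) 1).foldl
    (fun acc v =>
      let acc := acc ++ [PySem.List.pyGetD indices v 0]
      if PySem.Int.band v 1 ≠ 0 then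
        acc ++ [PySem.List.pyGetD indices (v + 1) 0, PySem.List.pyGetD indices (v + 2) 0]
      else
        acc ++ [PySem.List.pyGetD indices (v + 2) 0, PySem.List.pyGetD indices (v + 1) 0]) []
  (split_port new_indices 3).filter
    (fun a => PySem.Set.len (PySem.Set.ofList a) == 3)

-- ===== PORT B =====
def strip_to_list_alt (indices : List Int) : List (List Int) :=
  (((indices.zip (PySem.List.slice indices (some 1) none)).zip
      (PySem.List.slice indices (some 2) none)).foldl
    (fun st x =>
      match st, x with
      | (flip, out), ((a, b), c) =>
        (!flip,
         if a ≠ b ∧ b ≠ c ∧ a ≠ c then out ++ [if flip then [a, b, c] else [a, c, b]]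
         else out))
    (false, ([] : List (List Int)))).2

-- ===== PRECONDITION & SPEC =====
def Spec_strip_to_list (indices : List Int) (out : List (List Int)) : Prop := out = strip_to_list_alt indices
instance (indices : List Int) (out : List (List Int)) : Decidable (Spec_strip_to_list indices out) := by unfold Spec_strip_to_list; infer_instance

-- ===== CLAIM (what is proved, stated in full; the proofs are below) =====
def Claim_equal_strip_to_list : Prop := ∀ (indices : List Int), Dom_strip_to_list indices → Spec_strip_to_list indices (strip_to_list indices)

-- ===== LEMMAS AND PROOFS =====

-- reference recursion: the filtered triangle list both ports compute
def goB (p : Bool) : List Int → List (List Int)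
  | a :: b :: c :: r =>
      (if a ≠ b ∧ b ≠ c ∧ a ≠ c then [if p then [a, b, c] else [a, c, b]] else []) ++
        goB (!p) (b :: c :: r)
  | _ => []

-- reference recursion: A's flat new_indices list
def flatA (p : Bool) : List Int → List Int
  | a :: b :: c :: r =>
      a :: (if p then [b, c] else [c, b]) ++ flatA (!p) (b :: c :: r)
  | _ => []

-- A's per-index chunk, over Nat indices, with an explicit parity flag
def Gp (l : List Int) (p : Bool) (k : Nat) : List Int :=
  l.getD k 0 ::
    (if ((k % 2 == 1) ^^ p) then [l.getD (k + 1) 0, l.getD (k + 2) 0]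
     else [l.getD (k + 2) 0, l.getD (k + 1) 0])

theorem Gp_succ (x : Int) (t : List Int) (p : Bool) (k : Nat) :
    Gp (x :: t) p (k + 1) = Gp t (!p) k := by
  rcases Nat.mod_two_eq_zero_or_one k with h | h <;>
    simp [Gp, Nat.add_mod, h]

theorem flatMap_range_Gp (l : List Int) :
    ∀ p : Bool, (List.range (l.length - 2)).flatMap (Gp l p) = flatA p l := by
  induction l with
  | nil => intro p; simp [flatA]
  | cons a t ih =>
    intro p
    match t with
    | [] => simp [flatA]
    | [b] => simp [flatA]
    | b :: c :: r =>
      have hlen : (a :: b :: c :: r).length - 2 = ((b :: c :: r).length - 2) + 1 := by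
        simp
      rw [hlen, List.range_succ_eq_map, List.flatMap_cons, List.flatMap_map]
      have hstep : (fun k => Gp (a :: b :: c :: r) p (Nat.succ k)) =
          Gp (b :: c :: r) (!p) := by
        funext k; exact Gp_succ a (b :: c :: r) p k
      rw [hstep, ih (!p)]
      cases p <;> simp [Gp, flatA]

-- A's foldl builds exactly flatA false
theorem newA_eq_flatA (l : List Int) :
    (PySem.List.pyRange 0 ((l.length : Int) - 2) 1).foldl
      (fun acc v =>
        let acc := acc ++ [PySem.List.pyGetD l v 0]
        if PySem.Int.band v 1 ≠ 0 then
          acc ++ [PySem.List.pyGetD l (v + 1) 0, PySem.List.pyGetD l (v + 2) 0]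
        else
          acc ++ [PySem.List.pyGetD l (v + 2) 0, PySem.List.pyGetD l (v + 1) 0]) [] =
    flatA false l := by
  have hbody : (fun (acc : List Int) (v : Int) =>
        let acc := acc ++ [PySem.List.pyGetD l v 0]
        if PySem.Int.band v 1 ≠ 0 then
          acc ++ [PySem.List.pyGetD l (v + 1) 0, PySem.List.pyGetD l (v + 2) 0]
        else
          acc ++ [PySem.List.pyGetD l (v + 2) 0, PySem.List.pyGetD l (v + 1) 0]) =
      (fun acc v => acc ++
        (PySem.List.pyGetD l v 0 ::
          (if PySem.Int.band v 1 ≠ 0 then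
            [PySem.List.pyGetD l (v + 1) 0, PySem.List.pyGetD l (v + 2) 0]
          else
            [PySem.List.pyGetD l (v + 2) 0, PySem.List.pyGetD l (v + 1) 0]))) := by
    funext acc v
    by_cases h : PySem.Int.band v 1 ≠ 0 <;> simp [h]
  rw [hbody, PySem.List.foldl_append_eq_flatMap, List.nil_append,
    PySem.List.pyRange_one, List.flatMap_map]
  have hc : ((l.length : Int) - 2 - 0).toNat = l.length - 2 := by omega
  rw [hc, ← flatMap_range_Gp l false]
  apply List.flatMap_congr
  intro k _
  have hband : PySem.Int.band (0 + (k : Int)) 1 = ((k &&& 1 : Nat) : Int) := by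
    rw [zero_add]; exact_mod_cast PySem.Int.band_natCast k 1
  have h1 : (0 : Int) + (k : Int) + 1 = ((k + 1 : Nat) : Int) := by push_cast; ring
  have h2 : (0 : Int) + (k : Int) + 2 = ((k + 2 : Nat) : Int) := by push_cast; ring
  have g0 : PySem.List.pyGetD l ((k : Nat) : Int) 0 = l.getD k 0 :=
    PySem.List.pyGetD_natCast l k 0
  have g1 : PySem.List.pyGetD l ((k : Int) + 1) 0 = l.getD (k + 1) 0 := by
    rw [show ((k : Int) + 1) = ((k + 1 : Nat) : Int) by push_cast; ring]
    exact PySem.List.pyGetD_natCast l (k + 1) 0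
  have g2 : PySem.List.pyGetD l ((k : Int) + 2) 0 = l.getD (k + 2) 0 := by
    rw [show ((k : Int) + 2) = ((k + 2 : Nat) : Int) by push_cast; ring]
    exact PySem.List.pyGetD_natCast l (k + 2) 0
  rw [hband, h1, h2]
  rcases Nat.mod_two_eq_zero_or_one k with h | h <;>
    simp [Gp, Nat.and_one_is_mod, h, g0, g1, g2]

-- split into 3-chunks, structurally
theorem split_port_nil : split_port [] 3 = [] := by
  rw [split_port, PySem.List.pyRange_of_pos _ _ (by norm_num)]
  simp

theorem slice_shift3 (x y z : Int) (ys : List Int) (k : Nat) :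
    PySem.List.slice (x :: y :: z :: ys) (some (0 + 3 * ((k : Int) + 1)))
      (some (0 + 3 * ((k : Int) + 1) + 3)) =
    PySem.List.slice ys (some (0 + 3 * (k : Int))) (some (0 + 3 * (k : Int) + 3)) := by
  have e1 : (0 : Int) + 3 * ((k : Int) + 1) = ((3 * k + 3 : Nat) : Int) := by push_cast; ring
  have e2 : (0 : Int) + 3 * ((k : Int) + 1) + 3 = ((3 * k + 6 : Nat) : Int) := by push_cast; ring
  have e3 : (0 : Int) + 3 * (k : Int) = ((3 * k : Nat) : Int) := by push_cast; ring
  have e4 : (0 : Int) + 3 * (k : Int) + 3 = ((3 * k + 3 : Nat) : Int) := by push_cast; ring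
  rw [e2, e1, e4, e3, PySem.List.slice_natCast, PySem.List.slice_natCast]
  simp [List.drop_succ_cons]

theorem split_port_cons (x y z : Int) (ys : List Int) :
    split_port (x :: y :: z :: ys) 3 = [x, y, z] :: split_port ys 3 := by
  rw [split_port, split_port,
    PySem.List.pyRange_of_pos _ _ (by norm_num : (0 : Int) < 3),
    PySem.List.pyRange_of_pos _ _ (by norm_num : (0 : Int) < 3)]
  have hlen : ((x :: y :: z :: ys).length : Int) = (ys.length : Int) + 3 := by
    simp; push_cast; ring
  rw [hlen]
  have hn0 : (0 : Int) ≤ (ys.length : Int) := Int.natCast_nonneg _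
  have hcount : (if (0 : Int) < (ys.length : Int) + 3 then
        (((ys.length : Int) + 3 - 0 + 3 - 1) / 3).toNat else 0) =
      (if (0 : Int) < (ys.length : Int) then
        (((ys.length : Int) - 0 + 3 - 1) / 3).toNat else 0) + 1 := by
    by_cases h : (0 : Int) < (ys.length : Int)
    · have e : (ys.length : Int) + 3 - 0 + 3 - 1 = ((ys.length : Int) - 0 + 3 - 1) + 1 * 3 := by
        ring
      rw [e, Int.add_mul_ediv_right _ _ (by norm_num : (3:Int) ≠ 0)]
      have hd : (0 : Int) ≤ ((ys.length : Int) - 0 + 3 - 1) / 3 :=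
        Int.ediv_nonneg (by omega) (by norm_num)
      simp only [if_pos h, if_pos (by omega : (0 : Int) < (ys.length : Int) + 3)]
      omega
    · have hz : (ys.length : Int) = 0 := by omega
      rw [hz]
      norm_num
  rw [hcount]
  simp only [List.range_succ_eq_map, List.map_map, List.map_cons]
  congr 1
  apply List.map_congr_left
  intro k _
  simp only [Function.comp_apply]
  rw [show ((Nat.succ k : Nat) : Int) = (k : Int) + 1 by push_cast; ring]
  exact slice_shift3 x y z ys k

-- the distinctness test on a 3-element chunk
theorem cond3 (x y z : Int) :
    (PySem.Set.len (PySem.Set.ofList [x, y, z]) == 3) =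
      decide (x ≠ y ∧ y ≠ z ∧ x ≠ z) := by
  by_cases h1 : x = y <;> by_cases h2 : y = z <;> by_cases h3 : x = z <;>
    simp only [PySem.Set.ofList, PySem.Set.add, PySem.Set.len, PySem.Set.contains,
      List.foldl] <;>
    simp [h1, h2, h3, List.mem_cons, eq_comm]

theorem split_flatA_eq_goB (l : List Int) :
    ∀ p : Bool,
      (split_port (flatA p l) 3).filter
        (fun a => PySem.Set.len (PySem.Set.ofList a) == 3) = goB p l := by
  induction l with
  | nil => intro p; simp [flatA, goB, split_port_nil]
  | cons a t ih =>
    intro p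
    match t with
    | [] => simp [flatA, goB, split_port_nil]
    | [b] => simp [flatA, goB, split_port_nil]
    | b :: c :: r =>
      cases p
      case false =>
        show (split_port (a :: c :: b :: flatA true (b :: c :: r)) 3).filter _ = _
        rw [split_port_cons, List.filter_cons, ih true, cond3]
        by_cases h : a ≠ b ∧ b ≠ c ∧ a ≠ c
        · have h' : a ≠ c ∧ c ≠ b ∧ a ≠ b := by
            refine ⟨h.2.2, fun e => h.2.1 e.symm, h.1⟩
          simp [goB, h, h']
        · have h' : ¬ (a ≠ c ∧ c ≠ b ∧ a ≠ b) := by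
            intro hc; exact h ⟨hc.2.2, fun e => hc.2.1 e.symm, hc.1⟩
          simp [goB, h, h']
      case true =>
        show (split_port (a :: b :: c :: flatA false (b :: c :: r)) 3).filter _ = _
        rw [split_port_cons, List.filter_cons, ih false, cond3]
        by_cases h : a ≠ b ∧ b ≠ c ∧ a ≠ c <;> simp [goB, h]

-- B's fold over the zipped windows computes goB
theorem foldB_eq_goB (l : List Int) :
    ∀ (flip : Bool) (out : List (List Int)),
      (((l.zip (l.drop 1)).zip (l.drop 2)).foldl
        (fun st x =>
          match st, x with
          | (flip, out), ((a, b), c) =>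
            (!flip,
             if a ≠ b ∧ b ≠ c ∧ a ≠ c then out ++ [if flip then [a, b, c] else [a, c, b]]
             else out))
        (flip, out)).2 = out ++ goB flip l := by
  induction l with
  | nil => intro flip out; simp [goB]
  | cons a t ih =>
    intro flip out
    match t with
    | [] => simp [goB]
    | [b] => simp [goB]
    | b :: c :: r =>
      have hz : ((a :: b :: c :: r).zip ((a :: b :: c :: r).drop 1)).zip
          ((a :: b :: c :: r).drop 2) =
          ((a, b), c) :: (((b :: c :: r).zip ((b :: c :: r).drop 1)).zip
            ((b :: c :: r).drop 2)) := by
        simp [List.zip_cons_cons]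
      rw [hz, List.foldl_cons]
      show (List.foldl _ (!flip, _) _).2 = _
      rw [ih (!flip)]
      by_cases h : a ≠ b ∧ b ≠ c ∧ a ≠ c <;> cases flip <;> simp [goB, h]

-- ===== VERDICT (by name: the statement is the Claim_ definition above) =====
theorem strip_to_list_spec : Claim_equal_strip_to_list := by
  intro l _
  show strip_to_list l = strip_to_list_alt l
  rw [strip_to_list, strip_to_list_alt]
  rw [PySem.List.slice_from_one, PySem.List.slice_from l (by norm_num : (0:Int) ≤ 2)]
  have ht : l.tail = l.drop 1 := by simp
  rw [ht]
  have h2 : ((2 : Int)).toNat = 2 := by decide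
  rw [h2]
  simp only [newA_eq_flatA l]
  rw [split_flatA_eq_goB l false, foldB_eq_goB l false []]
  simp
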